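-- pv_equiv track=rewrite | github.com/cubernetes/aoc2023 | 9/solution2_ugly.py | get_firsts
-- ===== SOURCE A (Python) =====
-- def difference_seq(ns):
--     ds = []
--     for n, next in zip(ns, ns[1:]):
--         ds.append(next - n)
--     return ds
--
-- def get_firsts(ns):
--     seqs = [ns]
--     while any(seqs[-1]):
--         ds = difference_seq(seqs[-1])
--         seqs.append(ds)
--     firsts = []
--     for s in seqs:
--         firsts.append(s[0])
--     return firsts
-- ===== SOURCE B (Python) =====
-- def difference_seq(ns):
--     return [b - a for a, b in zip(ns, ns[1:])]
--
-- def get_firsts(ns):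
--     if not any(ns):
--         return [ns[0]]
--     return [ns[0]] + get_firsts(difference_seq(ns))
-- ===== Notes on version B (the rewrite author's own statement) =====
-- stated objective: alternative
-- what changed: Replaces the while-loop that stores every derived sequence in a seqs list (then a second loop collecting s[0]) with a direct recursion on the difference sequence that emits each level's first element on return, keeping only the current sequence.
import Mathlib
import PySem

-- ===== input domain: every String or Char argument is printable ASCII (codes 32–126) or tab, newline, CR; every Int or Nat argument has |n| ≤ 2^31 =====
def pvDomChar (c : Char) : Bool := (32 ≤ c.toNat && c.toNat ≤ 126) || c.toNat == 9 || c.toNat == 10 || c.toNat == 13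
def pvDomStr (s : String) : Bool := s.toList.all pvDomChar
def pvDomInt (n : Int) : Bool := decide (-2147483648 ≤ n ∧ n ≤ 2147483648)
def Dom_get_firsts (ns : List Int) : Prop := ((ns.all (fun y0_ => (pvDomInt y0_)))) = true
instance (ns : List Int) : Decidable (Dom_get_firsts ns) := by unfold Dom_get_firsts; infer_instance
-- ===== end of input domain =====

-- B replaces A's while-loop that stores every derived sequence with a direct recursion on the
-- difference sequence, emitting each level's first element on return (same values; no speed claim).
-- Inside Pre_ every sequence indexed by s[0] is nonempty, so headD 0 is exact for the Python s[0].

-- ===== PORT A =====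
-- A's difference_seq: ds = []; for n, next in zip(ns, ns[1:]): ds.append(next - n)
def difference_seq (ns : List Int) : List Int :=
  (ns.zip (PySem.List.slice ns (some 1) none)).foldl (fun ds p => ds ++ [p.2 - p.1]) []

theorem difference_seq_length_lt (ns : List Int) (h : ns ≠ []) :
    (difference_seq ns).length < ns.length := by
  have hf : ∀ (l : List (Int × Int)) (acc : List Int),
      (l.foldl (fun ds p => ds ++ [p.2 - p.1]) acc).length = acc.length + l.length := by
    intro l
    induction l with
    | nil => simp
    | cons x xs ih =>
      intro acc
      rw [List.foldl_cons, ih]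
      simp only [List.length_append, List.length_cons, List.length_nil]
      omega
  unfold difference_seq
  rw [PySem.List.slice_from_one, hf]
  cases ns with
  | nil => simp at h
  | cons a t => simp [List.length_zip]

-- A's while loop: seqs = [ns]; while any(seqs[-1]): seqs.append(difference_seq(seqs[-1]))
def get_firsts_loop (cur : List Int) (seqs : List (List Int)) : List (List Int) :=
  if cur.any (fun x => decide (x ≠ 0)) then
    get_firsts_loop (difference_seq cur) (seqs ++ [difference_seq cur])
  else seqs
termination_by cur.length
decreasing_by
  exact difference_seq_length_lt cur (by rintro rfl; simp at *)

def get_firsts (ns : List Int) : List Int :=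
  (get_firsts_loop ns [ns]).foldl (fun fs s => fs ++ [s.headD 0]) []

-- ===== PORT B =====
-- B's difference_seq: [b - a for a, b in zip(ns, ns[1:])]
def difference_seq_alt (ns : List Int) : List Int :=
  (ns.zip (PySem.List.slice ns (some 1) none)).map (fun p => p.2 - p.1)

theorem difference_seq_alt_length_lt (ns : List Int) (h : ns ≠ []) :
    (difference_seq_alt ns).length < ns.length := by
  unfold difference_seq_alt
  rw [PySem.List.slice_from_one]
  cases ns with
  | nil => simp at h
  | cons a t => simp

def get_firsts_alt (ns : List Int) : List Int :=
  if ns.any (fun x => decide (x ≠ 0)) then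
    ns.headD 0 :: get_firsts_alt (difference_seq_alt ns)
  else [ns.headD 0]
termination_by ns.length
decreasing_by
  exact difference_seq_alt_length_lt ns (by rintro rfl; simp at *)

-- ===== PRECONDITION & SPEC =====
-- iterated-difference helper used only to state Pre_ (independent of both ports)
def pvDiffStep (ns : List Int) : List Int :=
  (ns.zip ns.tail).map (fun p => p.2 - p.1)

-- Pre_ excludes exactly the inputs on which Python A raises IndexError (s[0] on an empty level):
-- it requires ns to be nonempty and some iterated difference sequence to become all-zero while
-- still nonempty (equivalently, within ns.length - 1 steps).
def Pre_get_firsts (ns : List Int) : Prop :=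
  ns ≠ [] ∧ ∃ k < ns.length, ∀ x ∈ pvDiffStep^[k] ns, x = 0
instance (ns : List Int) : Decidable (Pre_get_firsts ns) := by unfold Pre_get_firsts; infer_instance

def pvWitness_get_firsts : List Int := [1, 3, 6, 10]

def Spec_get_firsts (ns : List Int) (out : List Int) : Prop := out = get_firsts_alt ns
instance (ns : List Int) (out : List Int) : Decidable (Spec_get_firsts ns out) := by unfold Spec_get_firsts; infer_instance

-- ===== CLAIM (what is proved, stated in full; the proofs are below) =====
def Claim_equal_get_firsts : Prop := ∀ (ns : List Int), Dom_get_firsts ns → Pre_get_firsts ns → Spec_get_firsts ns (get_firsts ns)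

-- ===== LEMMAS AND PROOFS =====

theorem foldl_push {α β : Type} (f : α → β) :
    ∀ (l : List α) (acc : List β),
      l.foldl (fun ds p => ds ++ [f p]) acc = acc ++ l.map f := by
  intro l
  induction l with
  | nil => simp
  | cons x xs ih => intro acc; simp [List.foldl, ih]

theorem diff_eq (ns : List Int) : difference_seq ns = difference_seq_alt ns := by
  unfold difference_seq difference_seq_alt
  rw [foldl_push]
  simp

theorem alt_cons (ns : List Int) :
    get_firsts_alt ns = ns.headD 0 :: (get_firsts_alt ns).tail := by
  rw [get_firsts_alt]
  split <;> simp

theorem loop_map (cur : List Int) (seqs : List (List Int)) :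
    (get_firsts_loop cur seqs).map (fun s => s.headD 0)
      = seqs.map (fun s => s.headD 0) ++ (get_firsts_alt cur).tail := by
  induction cur, seqs using get_firsts_loop.induct with
  | case1 cur seqs h ih =>
    rw [get_firsts_loop, if_pos h, ih, diff_eq]
    conv_rhs => rw [get_firsts_alt, if_pos h]
    simp only [List.map_append, List.map_cons, List.map_nil, List.tail_cons, List.append_assoc]
    rw [List.singleton_append, ← alt_cons]
  | case2 cur seqs h =>
    rw [get_firsts_loop, if_neg h, get_firsts_alt, if_neg h]
    simp

theorem ports_agree (ns : List Int) : get_firsts ns = get_firsts_alt ns := by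
  unfold get_firsts
  rw [foldl_push, loop_map]
  simp only [List.nil_append, List.map_cons, List.map_nil, List.singleton_append]
  exact (alt_cons ns).symm

-- ===== VERDICT (by name: the statement is the Claim_ definition above) =====
theorem get_firsts_spec : Claim_equal_get_firsts := by
  intro ns _ _
  exact ports_agree ns
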